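-- pv_equiv track=rewrite | github.com/ManoharYekkala/PasswordManager | rough.py | minimum_colors
-- ===== SOURCE A (Python) =====
-- def minimum_colors(n, s, v):
--     v.sort()
--     color_count = 1
--     start = v[0]
--     for i in range(1, n):
--         if v[i] - start > s:
--             color_count += 1
--             start = v[i]
--     return color_count
-- ===== SOURCE B (Python) =====
-- import bisect
--
-- def minimum_colors(n, s, v):
--     v.sort()
--     color_count = 1
--     i = bisect.bisect_right(v, v[0] + s, 1, n)
--     while i < n:
--         color_count += 1
--         i = bisect.bisect_right(v, v[i] + s, i + 1, n)
--     return color_count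
-- ===== Notes on version B (the rewrite author's own statement) =====
-- stated objective: alternative
-- what changed: After the sort, B replaces A's element-by-element linear scan with binary-search jumps: bisect_right finds the first element beyond start+s, so the loop advances group-to-group instead of index-by-index.
import Mathlib
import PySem

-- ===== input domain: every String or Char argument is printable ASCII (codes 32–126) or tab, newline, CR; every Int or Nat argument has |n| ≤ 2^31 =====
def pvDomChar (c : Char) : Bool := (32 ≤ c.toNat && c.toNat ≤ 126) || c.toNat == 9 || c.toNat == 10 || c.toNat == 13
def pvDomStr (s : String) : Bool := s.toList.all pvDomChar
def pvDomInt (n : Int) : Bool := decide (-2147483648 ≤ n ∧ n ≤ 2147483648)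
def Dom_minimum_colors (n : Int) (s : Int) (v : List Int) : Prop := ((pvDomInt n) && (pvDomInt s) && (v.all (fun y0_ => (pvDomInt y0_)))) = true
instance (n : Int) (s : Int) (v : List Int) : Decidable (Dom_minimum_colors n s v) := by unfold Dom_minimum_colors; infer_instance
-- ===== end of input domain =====

-- B replaces A's linear scan over the sorted list by binary-search jumps (bisect_right)
-- from group start to group start; objective: alternative algorithm, same result.
-- Both A and B sort v in place (the Python side); the equivalence proved here is about
-- the return value.

-- ===== PORT A =====
-- v.sort(); color_count = 1; start = v[0]; for i in range(1, n): if v[i]-start > s: …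
def minimum_colors (n : Int) (s : Int) (v : List Int) : Int :=
  let w := PySem.List.sorted v (fun x => x) false
  let start := PySem.List.pyGetD w 0 0
  ((PySem.List.pyRange 1 n 1).foldl
    (fun st i =>
      if PySem.List.pyGetD w i 0 - st.2 > s then (st.1 + 1, PySem.List.pyGetD w i 0) else st)
    (1, start)).1

-- ===== PORT B =====
-- bisect.bisect_right(w, x, lo, hi) for 0 ≤ lo ≤ hi ≤ len w is lo + bisect_right of w[lo:hi]
def bisectSeg (w : List Int) (x : Int) (lo : Int) (hi : Int) : Int :=
  lo + (PySem.List.bisectRight (PySem.List.slice w (some lo) (some hi)) x : Int)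

-- while i < n: color_count += 1; i = bisect.bisect_right(v, v[i] + s, i + 1, n)
-- (fuel only makes the loop total; inside Pre_ the fuel n.toNat is never exhausted)
def minColorsLoop (w : List Int) (s : Int) (n : Int) : Nat → Int → Int → Int
  | 0, cc, _ => cc
  | fuel+1, cc, i =>
    if i < n then
      minColorsLoop w s n fuel (cc + 1) (bisectSeg w (PySem.List.pyGetD w i 0 + s) (i + 1) n)
    else cc

def minimum_colors_alt (n : Int) (s : Int) (v : List Int) : Int :=
  let w := PySem.List.sorted v (fun x => x) false
  minColorsLoop w s n n.toNat 1 (bisectSeg w (PySem.List.pyGetD w 0 0 + s) 1 n)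

-- ===== PRECONDITION & SPEC =====
-- Pre_ excludes exactly the inputs where A raises IndexError: empty v (v[0]) or n > len(v)
-- (the loop reads v[i] for i up to n-1).
def Pre_minimum_colors (n : Int) (s : Int) (v : List Int) : Prop :=
  v ≠ [] ∧ n ≤ (v.length : Int)
instance (n : Int) (s : Int) (v : List Int) : Decidable (Pre_minimum_colors n s v) := by
  unfold Pre_minimum_colors; infer_instance

def pvWitness_minimum_colors : Int × Int × List Int := (5, 2, [1, 9, 2, 8, 4])

def Spec_minimum_colors (n : Int) (s : Int) (v : List Int) (out : Int) : Prop := out = minimum_colors_alt n s v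
instance (n : Int) (s : Int) (v : List Int) (out : Int) : Decidable (Spec_minimum_colors n s v out) := by unfold Spec_minimum_colors; infer_instance

-- ===== CLAIM (what is proved, stated in full; the proofs are below) =====
def Claim_equal_minimum_colors : Prop := ∀ (n : Int) (s : Int) (v : List Int), Dom_minimum_colors n s v → Pre_minimum_colors n s v → Spec_minimum_colors n s v (minimum_colors n s v)

-- ===== LEMMAS AND PROOFS =====

-- A's scan, as a recursion on the index (proof-side view of A's fold)
def countFrom (w : List Int) (s n : Int) (start cc k : Int) : Int :=
  if k < n then
    (let x := PySem.List.pyGetD w k 0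
     if x - start > s then countFrom w s n x (cc + 1) (k + 1)
     else countFrom w s n start cc (k + 1))
  else cc
termination_by (n - k).toNat
decreasing_by all_goals simp_wf; omega

theorem foldA_eq_countFrom (w : List Int) (s n : Int) :
    ∀ (m : Nat) (k cc start : Int), (n - k).toNat = m →
    ((PySem.List.pyRange k n 1).foldl
      (fun st i =>
        if PySem.List.pyGetD w i 0 - st.2 > s then (st.1 + 1, PySem.List.pyGetD w i 0) else st)
      (cc, start)).1 = countFrom w s n start cc k := by
  intro m
  induction m with
  | zero =>
    intro k cc start hm
    rw [PySem.List.pyRange_one_eq_nil (by omega), countFrom]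
    simp; omega
  | succ m ih =>
    intro k cc start hm
    have hk : k < n := by omega
    rw [PySem.List.pyRange_one_cons hk, countFrom]
    rw [List.foldl_cons, if_pos hk]
    by_cases hx : PySem.List.pyGetD w k 0 - start > s
    · rw [if_pos hx, if_pos hx, ih (k + 1) (cc + 1) (PySem.List.pyGetD w k 0) (by omega)]
    · rw [if_neg hx, if_neg hx, ih (k + 1) cc start (by omega)]

-- characterisation of bisect.bisect_right(w, x, lo, hi) on a sorted list
theorem bisectSeg_spec (w : List Int) (x lo hi : Int)
    (hw : w.Pairwise (· ≤ ·)) (hlo : 0 ≤ lo) (hlohi : lo ≤ hi) (hhi : hi ≤ (w.length : Int)) :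
    lo ≤ bisectSeg w x lo hi ∧ bisectSeg w x lo hi ≤ hi ∧
    (∀ k : Int, lo ≤ k → k < bisectSeg w x lo hi → PySem.List.pyGetD w k 0 ≤ x) ∧
    (bisectSeg w x lo hi < hi → x < PySem.List.pyGetD w (bisectSeg w x lo hi) 0) := by
  have hsub : PySem.List.slice w (some lo) (some hi)
      = (w.drop lo.toNat).take (hi.toNat - lo.toNat) :=
    PySem.List.slice_toNat w hlo (by omega)
  have hpair : (PySem.List.slice w (some lo) (some hi)).Pairwise (· ≤ ·) := by
    rw [hsub]
    exact List.Pairwise.sublist ((List.take_sublist _ _).trans (List.drop_sublist _ _)) hw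
  have hlen : (PySem.List.slice w (some lo) (some hi)).length = (hi - lo).toNat := by
    rw [hsub]; simp [List.length_take, List.length_drop]; omega
  have hget : ∀ t : Nat, (ht : t < (PySem.List.slice w (some lo) (some hi)).length) →
      (PySem.List.slice w (some lo) (some hi))[t] = PySem.List.pyGetD w (lo + t) 0 := by
    intro t ht
    have ht' : t < (hi - lo).toNat := hlen ▸ ht
    have hb : lo.toNat + t < w.length := by omega
    have e1 : (PySem.List.slice w (some lo) (some hi))[t] = w[lo.toNat + t] := by
      simp only [hsub, List.getElem_take, List.getElem_drop]
    have hcast : lo + (t : Int) = ((lo.toNat + t : Nat) : Int) := by omega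
    rw [e1, hcast, PySem.List.pyGetD_natCast]
    exact (List.getD_eq_getElem w 0 hb).symm
  obtain ⟨r_le, r_lt, r_ge⟩ :=
    PySem.List.bisectRight_spec (PySem.List.slice w (some lo) (some hi)) x hpair
  set r : Nat := PySem.List.bisectRight (PySem.List.slice w (some lo) (some hi)) x with hr
  have hbs : bisectSeg w x lo hi = lo + (r : Int) := rfl
  rw [hlen] at r_le
  refine ⟨by omega, by omega, ?_, ?_⟩
  · intro k hk1 hk2
    rw [hbs] at hk2
    have ht : (k - lo).toNat < r := by omega
    have ht' : (k - lo).toNat < (PySem.List.slice w (some lo) (some hi)).length := by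
      rw [hlen]; omega
    have h5 := r_lt (k - lo).toNat ht' ht
    rw [hget _ ht'] at h5
    have h6 : PySem.List.pyGetD w (lo + (((k - lo).toNat : Nat) : Int)) 0 = PySem.List.pyGetD w k 0 := by
      congr 1; omega
    rw [h6] at h5
    exact h5
  · intro hlt
    rw [hbs] at hlt ⊢
    have ht' : r < (PySem.List.slice w (some lo) (some hi)).length := by rw [hlen]; omega
    have := r_ge r ht' le_rfl
    rw [hget _ ht'] at this
    exact this

-- A's scan does not change state over indices whose value is ≤ start + s
theorem countFrom_skip (w : List Int) (s n start cc : Int) :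
    ∀ (m : Nat) (k j : Int), (j - k).toNat = m → k ≤ j → j ≤ n →
    (∀ t : Int, k ≤ t → t < j → PySem.List.pyGetD w t 0 ≤ start + s) →
    countFrom w s n start cc k = countFrom w s n start cc j := by
  intro m
  induction m with
  | zero =>
    intro k j hm _ _ _
    have : k = j := by omega
    rw [this]
  | succ m ih =>
    intro k j hm hkj hjn hall
    have hk : k < j := by omega
    rw [countFrom, if_pos (by omega)]
    have hle : PySem.List.pyGetD w k 0 ≤ start + s := hall k le_rfl hk
    simp only [if_neg (by omega : ¬ PySem.List.pyGetD w k 0 - start > s)]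
    exact ih (k + 1) j (by omega) (by omega) hjn (fun t ht ht' => hall t (by omega) ht')

-- one greedy step: A's scan from i+1 with start w[i] jumps straight to the bisect point
theorem countFrom_step (w : List Int) (s n : Int) (hw : w.Pairwise (· ≤ ·))
    (hn : n ≤ (w.length : Int)) (i cc : Int) (hi : 0 ≤ i) (hin : i < n) :
    countFrom w s n (PySem.List.pyGetD w i 0) cc (i + 1) =
    (if bisectSeg w (PySem.List.pyGetD w i 0 + s) (i + 1) n < n then
      countFrom w s n (PySem.List.pyGetD w (bisectSeg w (PySem.List.pyGetD w i 0 + s) (i + 1) n) 0)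
        (cc + 1) (bisectSeg w (PySem.List.pyGetD w i 0 + s) (i + 1) n + 1)
    else cc) := by
  obtain ⟨h1, h2, h3, h4⟩ :=
    bisectSeg_spec w (PySem.List.pyGetD w i 0 + s) (i + 1) n hw (by omega) (by omega) hn
  set j := bisectSeg w (PySem.List.pyGetD w i 0 + s) (i + 1) n with hj
  rw [countFrom_skip w s n (PySem.List.pyGetD w i 0) cc (j - (i + 1)).toNat (i + 1) j rfl
       h1 h2 (fun t ht ht' => h3 t ht ht')]
  rw [countFrom]
  by_cases hjn : j < n
  · rw [if_pos hjn, if_pos hjn]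
    have := h4 hjn
    rw [if_pos (by omega)]
  · rw [if_neg hjn, if_neg hjn]

-- B's loop computes A's scan, given enough fuel
theorem loop_eq_countFrom (w : List Int) (s n : Int) (hw : w.Pairwise (· ≤ ·))
    (hn : n ≤ (w.length : Int)) :
    ∀ (fuel : Nat) (cc i : Int), 0 ≤ i → (n - i).toNat ≤ fuel →
    minColorsLoop w s n fuel cc i =
      (if i < n then countFrom w s n (PySem.List.pyGetD w i 0) (cc + 1) (i + 1) else cc) := by
  intro fuel
  induction fuel with
  | zero =>
    intro cc i hi hf
    rw [minColorsLoop, if_neg (by omega)]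
  | succ fuel ih =>
    intro cc i hi hf
    rw [minColorsLoop]
    by_cases hin : i < n
    · rw [if_pos hin, if_pos hin]
      obtain ⟨h1, h2, h3, h4⟩ :=
        bisectSeg_spec w (PySem.List.pyGetD w i 0 + s) (i + 1) n hw (by omega) (by omega) hn
      rw [ih (cc + 1) _ (by omega) (by omega)]
      rw [countFrom_step w s n hw hn i (cc + 1) hi hin]
    · rw [if_neg hin, if_neg hin]

-- ===== VERDICT (by name: the statement is the Claim_ definition above) =====
theorem minimum_colors_spec : Claim_equal_minimum_colors := by
  intro n s v _ hpre
  obtain ⟨hne, hn⟩ := hpre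
  unfold Spec_minimum_colors minimum_colors minimum_colors_alt
  simp only
  set w := PySem.List.sorted v (fun x => x) false with hwdef
  have hlen : (w.length : Int) = (v.length : Int) := by
    rw [hwdef, PySem.List.length_sorted]
  have hw : w.Pairwise (· ≤ ·) := PySem.List.sorted_pairwise v (fun x => x)
  have hnlen : n ≤ (w.length : Int) := by omega
  rw [foldA_eq_countFrom w s n (n - 1).toNat 1 1 (PySem.List.pyGetD w 0 0) rfl]
  by_cases hn1 : n < 1
  · have : n.toNat = 0 := by omega
    rw [this, minColorsLoop, countFrom, if_neg (by omega)]
  · rw [not_lt] at hn1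
    obtain ⟨h1, h2, h3, h4⟩ :=
      bisectSeg_spec w (PySem.List.pyGetD w 0 0 + s) 1 n hw (by omega) (by omega) hnlen
    rw [loop_eq_countFrom w s n hw hnlen n.toNat 1 _ (by omega) (by omega)]
    have h0n : (0 : Int) < n := by omega
    have := countFrom_step w s n hw hnlen 0 1 le_rfl h0n
    simp only [zero_add] at this
    rw [this]
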